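-- pv_equiv track=rewrite | github.com/yaya752/PokerAppPython | PokerApp2/Decisions.py | sumarry_tab
-- ===== SOURCE A (Python) =====
-- def sumarry_tab(tab_player):
--     player_name = []
--     i = 0
--     new_tab_player = []
--     while i< len(tab_player):
--         if tab_player[i][0] in player_name:
--             j = player_name.index(tab_player[i][0])
--             new_tab_player[j][3] = tab_player[i][3]
--         else:
--             new_tab_player.append(tab_player[i])
--             player_name.append(tab_player[i][0])
--         i+=1
--     return new_tab_player
-- ===== SOURCE B (Python) =====
-- def sumarry_tab(tab_player):
--     latest = {}
--     for row in tab_player: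
--         if len(row) > 3:
--             latest[row[0]] = row[3]
--     seen = set()
--     result = []
--     for row in tab_player:
--         name = row[0]
--         if name not in seen:
--             seen.add(name)
--             if name in latest:
--                 row[3] = latest[name]
--             result.append(row)
--     return result
-- ===== Notes on version B (the rewrite author's own statement) =====
-- stated objective: alternative
-- what changed: Replaced the single pass that patches earlier kept rows in place (list membership test + list.index into the output) by two passes: first a dict mapping each name to its latest field-3 value, then a seen-set pass that keeps each first-occurrence row with its field 3 taken from the dict; it trades the in-place patching for a precomputed lookup (asymptotically O(n) vs A's O(n*d) list scans, though not measurably faster on the benchmark inputs).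
import Mathlib
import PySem

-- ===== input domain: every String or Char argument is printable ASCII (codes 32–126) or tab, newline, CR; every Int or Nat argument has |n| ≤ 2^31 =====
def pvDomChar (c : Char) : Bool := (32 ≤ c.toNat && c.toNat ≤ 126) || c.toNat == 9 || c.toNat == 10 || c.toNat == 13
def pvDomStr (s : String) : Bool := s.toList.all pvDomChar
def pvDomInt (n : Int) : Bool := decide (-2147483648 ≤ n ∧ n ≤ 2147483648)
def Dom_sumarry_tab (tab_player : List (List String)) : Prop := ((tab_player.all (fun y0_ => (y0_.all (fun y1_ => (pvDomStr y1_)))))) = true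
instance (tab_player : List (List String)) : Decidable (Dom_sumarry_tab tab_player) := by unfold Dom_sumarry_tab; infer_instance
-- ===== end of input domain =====

-- B replaces A's single pass (list membership + list.index + patching earlier kept rows) by two
-- passes: a name -> latest-field-3 dict, then a seen-set pass keeping first occurrences; the
-- equivalence is about the RETURN value (both Pythons mutate row objects in place the same way
-- on Pre_, but that is not modelled here).

-- row[0] as both programs read it (total form; Pre_ keeps rows nonempty, where it is exact)
def pvName (r : List String) : String := (PySem.List.pyGet? r 0).getD ""

-- ===== PORT A =====
def pvStepA (st : List String × List (List String)) (row : List String) :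
    List String × List (List String) :=
  match PySem.List.index? st.1 (pvName row) with
  | some j =>
      (st.1, st.2.modify j (fun r => PySem.List.pySetD r 3 ((PySem.List.pyGet? row 3).getD "")))
  | none => (st.1 ++ [pvName row], st.2 ++ [row])

def sumarry_tab (tab_player : List (List String)) : List (List String) :=
  (tab_player.foldl pvStepA ([], [])).2

-- ===== PORT B =====
def pvStepB1 (d : PySem.Dict String String) (row : List String) : PySem.Dict String String :=
  if 3 < row.length then d.insert (pvName row) ((PySem.List.pyGet? row 3).getD "") else d

def pvLatest (tab_player : List (List String)) : PySem.Dict String String :=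
  tab_player.foldl pvStepB1 PySem.Dict.empty

def pvStepB2 (d : PySem.Dict String String) (st : PySem.Set String × List (List String))
    (row : List String) : PySem.Set String × List (List String) :=
  if PySem.Set.contains st.1 (pvName row) then st
  else (PySem.Set.add st.1 (pvName row),
        st.2 ++ [match d.get? (pvName row) with
                 | some v => PySem.List.pySetD row 3 v
                 | none => row])

def sumarry_tab_alt (tab_player : List (List String)) : List (List String) :=
  (tab_player.foldl (pvStepB2 (pvLatest tab_player)) (PySem.Set.empty, [])).2

-- ===== PRECONDITION & SPEC =====
-- Pre_ is exactly A's return domain: A raises IndexError on an empty row (row[0]) and on any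
-- name that occurs in several rows one of which has fewer than 4 fields (row[3] read/write).
def Pre_sumarry_tab (tab_player : List (List String)) : Prop :=
  (∀ r ∈ tab_player, r ≠ []) ∧
  (∀ r ∈ tab_player, 2 ≤ (tab_player.map pvName).count (pvName r) → 4 ≤ r.length)
instance (tab_player : List (List String)) : Decidable (Pre_sumarry_tab tab_player) := by
  unfold Pre_sumarry_tab; infer_instance

def pvWitness_sumarry_tab : List (List String) :=
  [["a", "p", "q", "1"], ["b"], ["a", "p", "q", "2"]]

def Spec_sumarry_tab (tab_player : List (List String)) (out : List (List String)) : Prop :=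
  out = sumarry_tab_alt tab_player
instance (tab_player : List (List String)) (out : List (List String)) :
    Decidable (Spec_sumarry_tab tab_player out) := by unfold Spec_sumarry_tab; infer_instance

-- ===== CLAIM (what is proved, stated in full; the proofs are below) =====
def Claim_equal_sumarry_tab : Prop := ∀ (tab_player : List (List String)),
  Dom_sumarry_tab tab_player → Pre_sumarry_tab tab_player →
  Spec_sumarry_tab tab_player (sumarry_tab tab_player)

-- ===== LEMMAS AND PROOFS =====

-- recursive form of B's second pass (seen names s, lookup dict d), in plain-list normal form
def pvPass2 (d : PySem.Dict String String) (s : List String) :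
    List (List String) → List (List String)
  | [] => []
  | r :: t =>
    if pvName r ∈ s then pvPass2 d s t
    else (match d.get? (pvName r) with
          | some v => r.set 3 v
          | none => r) :: pvPass2 d (s ++ [pvName r]) t

-- the seen-set component of B's second fold
def pvSeen (s : List String) : List (List String) → List String
  | [] => s
  | r :: t => if pvName r ∈ s then pvSeen s t else pvSeen (s ++ [pvName r]) t

-- replace field 3 of the first row named n
def pvUpdFirst (n v : String) : List (List String) → List (List String)
  | [] => []
  | r :: t => if pvName r = n then r.set 3 v :: t else r :: pvUpdFirst n v t

theorem pvSetD_eq_set (r : List String) (v : String) :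
    PySem.List.pySetD r (3 : Int) v = r.set 3 v := by
  rw [show (3 : Int) = ((3 : Nat) : Int) from rfl, PySem.List.pySetD_natCast]

theorem pvName_set (r : List String) (v : String) : pvName (r.set 3 v) = pvName r := by
  simp [pvName, PySem.List.pyGet?_zero]

theorem pvBridge (l : List (List String)) (d : PySem.Dict String String)
    (s : PySem.Set String) (acc : List (List String)) :
    l.foldl (pvStepB2 d) (s, acc) = (pvSeen s l, acc ++ pvPass2 d s l) := by
  induction l generalizing s acc with
  | nil => simp [pvPass2, pvSeen]
  | cons r t ih =>
    by_cases h : pvName r ∈ s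
    · have hc : PySem.Set.contains s (pvName r) = true := (PySem.Set.contains_iff _ _).mpr h
      simp [List.foldl_cons, pvStepB2, h, pvPass2, pvSeen, ih]
    · have hc : ¬ PySem.Set.contains s (pvName r) = true :=
        fun hx => h ((PySem.Set.contains_iff _ _).mp hx)
      rw [List.foldl_cons]
      simp only [pvStepB2, if_neg hc, PySem.Set.add_of_not_mem h]
      rw [ih]
      simp only [pvPass2, pvSeen, if_neg h, List.append_assoc, List.singleton_append]
      cases d.get? (pvName r) <;> simp [pvSetD_eq_set]

theorem pvPass2_insert_of_mem (d : PySem.Dict String String) (n v : String)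
    (l : List (List String)) (s : List String) (hn : n ∈ s) :
    pvPass2 (d.insert n v) s l = pvPass2 d s l := by
  induction l generalizing s with
  | nil => rfl
  | cons r t ih =>
    by_cases h : pvName r ∈ s
    · simp [pvPass2, h, ih s hn]
    · have hne : pvName r ≠ n := fun e => h (e ▸ hn)
      simp [pvPass2, h, PySem.Dict.get?_insert_of_ne d v hne,
        ih (s ++ [pvName r]) (List.mem_append_left _ hn)]

theorem pvPass2_insert_of_not_mem (d : PySem.Dict String String) (n v : String)
    (l : List (List String)) (s : List String) (hn : n ∉ s) :
    pvPass2 (d.insert n v) s l = pvUpdFirst n v (pvPass2 d s l) := by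
  induction l generalizing s with
  | nil => rfl
  | cons r t ih =>
    by_cases h : pvName r ∈ s
    · simp [pvPass2, h, ih s hn]
    · by_cases hm : pvName r = n
      · subst hm
        have h1 : pvPass2 (d.insert (pvName r) v) (s ++ [pvName r]) t
            = pvPass2 d (s ++ [pvName r]) t :=
          pvPass2_insert_of_mem d _ v t _ (List.mem_append_right _ (by simp))
        cases hg : d.get? (pvName r) with
        | none =>
          simp [pvPass2, h, hg, PySem.Dict.get?_insert_self, pvUpdFirst, h1]
        | some w =>
          simp [pvPass2, h, hg, PySem.Dict.get?_insert_self, pvUpdFirst, pvName_set, h1,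
            List.set_set]
      · have hn' : n ∉ s ++ [pvName r] := by
          simp only [List.mem_append, List.mem_singleton, not_or]
          exact ⟨hn, fun e => hm e.symm⟩
        cases hg : d.get? (pvName r) with
        | none =>
          simp [pvPass2, h, hg, PySem.Dict.get?_insert_of_ne d v hm, pvUpdFirst, hm, ih _ hn']
        | some w =>
          simp [pvPass2, h, hg, PySem.Dict.get?_insert_of_ne d v hm, pvUpdFirst, pvName_set,
            hm, ih _ hn']

theorem pvPass2_snoc (d : PySem.Dict String String) (x : List String)
    (l : List (List String)) (s : List String) :
    pvPass2 d s (l ++ [x]) =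
      pvPass2 d s l ++
        (if pvName x ∈ pvSeen s l then []
         else [match d.get? (pvName x) with
               | some v => x.set 3 v
               | none => x]) := by
  induction l generalizing s with
  | nil =>
    by_cases h : pvName x ∈ s <;> simp [pvPass2, pvSeen, h]
  | cons r t ih =>
    by_cases h : pvName r ∈ s
    · simp [pvPass2, pvSeen, h, ih s]
    · simp [pvPass2, pvSeen, h, ih (s ++ [pvName r])]

theorem pvMem_seen (l : List (List String)) (s : List String) (n : String) :
    n ∈ pvSeen s l ↔ n ∈ s ∨ n ∈ l.map pvName := by
  induction l generalizing s with
  | nil => simp [pvSeen]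
  | cons r t ih =>
    by_cases h : pvName r ∈ s
    · rw [pvSeen, if_pos h, ih]
      simp only [List.map_cons, List.mem_cons]
      constructor
      · rintro (h1 | h1)
        · exact Or.inl h1
        · exact Or.inr (Or.inr h1)
      · rintro (h1 | h1 | h1)
        · exact Or.inl h1
        · exact Or.inl (h1 ▸ h)
        · exact Or.inr h1
    · rw [pvSeen, if_neg h, ih]
      simp only [List.mem_append, List.map_cons, List.mem_cons]
      tauto

theorem pvUpdFirst_of_not_mem (n v : String) (nt : List (List String))
    (h : n ∉ nt.map pvName) : pvUpdFirst n v nt = nt := by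
  induction nt with
  | nil => rfl
  | cons r t ih =>
    simp only [List.map_cons, List.mem_cons, not_or] at h
    have hne : pvName r ≠ n := fun e => h.1 e.symm
    simp [pvUpdFirst, hne, ih h.2]

theorem pvUpdFirst_modify (n v : String) (nt : List (List String)) (j : Nat)
    (h : PySem.List.index? (nt.map pvName) n = some j) :
    pvUpdFirst n v nt = nt.modify j (fun r => r.set 3 v) := by
  rw [PySem.List.index?_eq_idxOf?] at h
  induction nt generalizing j with
  | nil => simp at h
  | cons r t ih =>
    rw [List.map_cons, List.idxOf?_cons] at h
    by_cases hm : pvName r = n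
    · rw [if_pos (by simp [hm])] at h
      cases h
      simp [pvUpdFirst, hm, List.modify]
    · rw [if_neg (by simp [hm])] at h
      cases hg : List.idxOf? n (t.map pvName) with
      | none => rw [hg] at h; simp at h
      | some j' =>
        rw [hg] at h; simp only [Option.map_some] at h
        cases h
        simpa [pvUpdFirst, hm] using ih j' hg

theorem pvMapName_modify (nt : List (List String)) (j : Nat) (v : String) :
    (nt.modify j (fun r => r.set 3 v)).map pvName = nt.map pvName := by
  induction nt generalizing j with
  | nil => simp
  | cons r t ih =>
    cases j with
    | zero => simp [List.modify, pvName_set]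
    | succ j' => simpa using ih j'

theorem pvLatest_get?_none (l : List (List String)) (d : PySem.Dict String String) (n : String)
    (h : n ∉ l.map pvName) : (l.foldl pvStepB1 d).get? n = d.get? n := by
  induction l generalizing d with
  | nil => rfl
  | cons r t ih =>
    simp only [List.map_cons, List.mem_cons, not_or] at h
    rw [List.foldl_cons, ih _ h.2]
    have hne : n ≠ pvName r := h.1
    by_cases hl : 3 < r.length
    · simp [pvStepB1, hl, PySem.Dict.get?_insert_of_ne d _ hne]
    · simp [pvStepB1, hl]

theorem pvPre_snoc (l : List (List String)) (x : List String)
    (h : Pre_sumarry_tab (l ++ [x])) : Pre_sumarry_tab l := by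
  obtain ⟨h1, h2⟩ := h
  refine ⟨fun r hr => h1 r (List.mem_append_left _ hr), fun r hr hc => ?_⟩
  refine h2 r (List.mem_append_left _ hr) ?_
  have hsub : (l.map pvName).Sublist ((l ++ [x]).map pvName) := by
    simp only [List.map_append]
    exact List.sublist_append_left _ _
  have := hsub.count_le (pvName r)
  omega

theorem pvSet_self (x : List String) (h : 3 < x.length) :
    x.set 3 ((PySem.List.pyGet? x 3).getD "") = x := by
  have hg : PySem.List.pyGet? x (3 : Int) = some x[3] := by
    rw [show (3 : Int) = ((3 : Nat) : Int) from rfl, PySem.List.pyGet?_natCast]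
    simp [List.getElem?_eq_getElem h]
  rw [hg]
  simp

theorem pvMain (l : List (List String)) :
    ((l.foldl pvStepA ([], [])).2.map pvName = (l.foldl pvStepA ([], [])).1)
    ∧ (∀ n, n ∈ (l.foldl pvStepA ([], [])).1 ↔ n ∈ l.map pvName)
    ∧ (Pre_sumarry_tab l →
        (l.foldl pvStepA ([], [])).2 = pvPass2 (pvLatest l) [] l) := by
  induction l using List.reverseRecOn with
  | nil => exact ⟨rfl, by simp, fun _ => rfl⟩
  | append_singleton l x ih =>
    obtain ⟨iha, ihb, ihc⟩ := ih
    rw [List.foldl_append]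
    simp only [List.foldl_cons, List.foldl_nil]
    set st := l.foldl pvStepA ([], []) with hst
    have hlat : pvLatest (l ++ [x]) = pvStepB1 (pvLatest l) x := by
      simp [pvLatest, List.foldl_append]
    cases hidx : PySem.List.index? st.1 (pvName x) with
    | some j =>
      have hA : pvStepA st x = (st.1,
          st.2.modify j (fun r => PySem.List.pySetD r 3 ((PySem.List.pyGet? x 3).getD ""))) := by
        unfold pvStepA; rw [hidx]
      have hmem : pvName x ∈ st.1 := by
        have h0 := PySem.List.index?_isSome_iff (xs := st.1) (v := pvName x)
        rw [hidx] at h0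
        simpa using h0
      have hmemL : pvName x ∈ l.map pvName := (ihb _).mp hmem
      refine ⟨?_, ?_, ?_⟩
      · rw [hA]
        simp only [pvSetD_eq_set]
        rw [pvMapName_modify]
        exact iha
      · intro n
        rw [hA]
        simp only [List.map_append, List.map_cons, List.map_nil, List.mem_append,
          List.mem_cons, List.not_mem_nil, or_false]
        constructor
        · intro h; exact Or.inl ((ihb n).mp h)
        · rintro (h | h)
          · exact (ihb n).mpr h
          · exact h ▸ hmem
      · intro hpre
        have hpl := pvPre_snoc l x hpre
        have hcnt : 2 ≤ ((l ++ [x]).map pvName).count (pvName x) := by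
          have h1 : 1 ≤ (l.map pvName).count (pvName x) := List.one_le_count_iff.mpr hmemL
          simp only [List.map_append, List.count_append, List.map_cons, List.map_nil]
          have h2 : 1 ≤ ([pvName x] : List String).count (pvName x) := by simp
          omega
        have hx4 : 4 ≤ x.length := hpre.2 x (List.mem_append_right _ (by simp)) hcnt
        have hx3 : 3 < x.length := by omega
        rw [hA, hlat]
        simp only [pvStepB1, if_pos hx3]
        rw [pvPass2_snoc, if_pos ((pvMem_seen l [] (pvName x)).mpr (Or.inr hmemL)),
          List.append_nil]
        rw [pvPass2_insert_of_not_mem _ _ _ _ _ (List.not_mem_nil)]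
        rw [← ihc hpl]
        rw [pvUpdFirst_modify _ _ _ j (by rw [iha]; exact hidx)]
        simp only [pvSetD_eq_set]
    | none =>
      have hA : pvStepA st x = (st.1 ++ [pvName x], st.2 ++ [x]) := by
        unfold pvStepA; rw [hidx]
      have hnmem : pvName x ∉ st.1 := by
        have h0 := PySem.List.index?_isSome_iff (xs := st.1) (v := pvName x)
        rw [hidx] at h0
        simp at h0
        exact h0
      have hnmemL : pvName x ∉ l.map pvName := fun h => hnmem ((ihb _).mpr h)
      refine ⟨?_, ?_, ?_⟩
      · rw [hA]
        simp [iha]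
      · intro n
        rw [hA]
        simp only [List.map_append, List.map_cons, List.map_nil, List.mem_append,
          List.mem_cons, List.not_mem_nil, or_false]
        constructor
        · rintro (h | h)
          · exact Or.inl ((ihb n).mp h)
          · exact Or.inr h
        · rintro (h | h)
          · exact Or.inl ((ihb n).mpr h)
          · exact Or.inr h
      · intro hpre
        have hpl := pvPre_snoc l x hpre
        have hseen : pvName x ∉ pvSeen [] l := by
          rw [pvMem_seen]
          simp only [List.not_mem_nil, false_or]
          exact hnmemL
        rw [hA, hlat]
        by_cases hx3 : 3 < x.length
        · simp only [pvStepB1, if_pos hx3]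
          rw [pvPass2_snoc, if_neg hseen]
          rw [pvPass2_insert_of_not_mem _ _ _ _ _ (List.not_mem_nil)]
          rw [← ihc hpl]
          rw [pvUpdFirst_of_not_mem _ _ _ (by rw [iha]; exact hnmem)]
          simp only [PySem.Dict.get?_insert_self]
          rw [pvSet_self x hx3]
        · simp only [pvStepB1, if_neg hx3]
          rw [pvPass2_snoc, if_neg hseen]
          have hget : (pvLatest l).get? (pvName x) = none := by
            unfold pvLatest
            rw [pvLatest_get?_none l PySem.Dict.empty _ hnmemL]
            rfl
          rw [hget]
          rw [← ihc hpl]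

-- ===== VERDICT (by name: the statement is the Claim_ definition above) =====
theorem sumarry_tab_spec : Claim_equal_sumarry_tab := by
  intro l _ hpre
  unfold Spec_sumarry_tab sumarry_tab sumarry_tab_alt
  rw [pvBridge]
  simpa using (pvMain l).2.2 hpre
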